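-- pv_equiv track=rewrite | github.com/DavidDarrow/Automaton | Automaton_class.py | wrap_index
-- ===== SOURCE A (Python) =====
-- def wrap_index(L, index):
--     length = len(L)
--     try:
--         return L[index]
--     except IndexError:
--         if index > 0:
--             return wrap_index(L, index-length)
--         else:
--             return wrap_index(L, index+length)
-- ===== SOURCE B (Python) =====
-- def wrap_index(L, index):
--     return L[index % len(L)]
-- ===== Notes on version B (the rewrite author's own statement) =====
-- stated objective: simpler
-- what changed: Replaces A's recursive repeated +/-len adjustment with a single modular reduction index % len(L) followed by one direct lookup.
-- outside the precondition, e.g. on wrap_index([1, 2, 3], 2800): A returns 2, B returns 2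
import Mathlib
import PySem

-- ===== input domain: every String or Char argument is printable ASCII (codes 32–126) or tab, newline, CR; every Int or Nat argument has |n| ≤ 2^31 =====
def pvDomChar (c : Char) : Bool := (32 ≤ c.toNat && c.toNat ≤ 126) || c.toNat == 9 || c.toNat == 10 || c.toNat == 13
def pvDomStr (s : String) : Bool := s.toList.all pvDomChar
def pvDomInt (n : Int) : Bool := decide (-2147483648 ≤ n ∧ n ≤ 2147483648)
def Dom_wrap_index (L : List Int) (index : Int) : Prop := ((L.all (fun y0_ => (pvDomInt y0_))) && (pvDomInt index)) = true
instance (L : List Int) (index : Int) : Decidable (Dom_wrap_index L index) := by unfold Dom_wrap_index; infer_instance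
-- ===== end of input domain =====

-- B replaces A's recursive repeated ±len(L) adjustment with one modular reduction and a single lookup (simpler).

-- ===== PORT A =====
-- A's recursion is not structurally decreasing in Lean; fuel makes the same computation
-- total (|index| + 1 steps suffice: each retry shrinks |index| by len(L) ≥ 1 on the inputs
-- where a retry happens; fuel 0 is reached only outside Pre_).
def wrapACore : Nat → List Int → Int → Int
  | 0, _, _ => 0
  | fuel+1, L, index =>
    match PySem.List.pyGet? L index with
    | some v => v
    | none =>
      if index > 0 then wrapACore fuel L (index - (L.length : Int))
      else wrapACore fuel L (index + (L.length : Int))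

def wrap_index (L : List Int) (index : Int) : Int :=
  wrapACore (index.natAbs + 1) L index

-- ===== PORT B =====
-- L[index % len(L)] ; the .getD 0 default is reached only for L = [] (Python: ZeroDivisionError), outside Pre_.
def wrap_index_alt (L : List Int) (index : Int) : Int :=
  (PySem.List.pyGet? L (PySem.Int.mod index (L.length : Int))).getD 0

-- ===== PRECONDITION & SPEC =====
-- Pre_ excludes L = [] (A recurses forever until RecursionError, B raises ZeroDivisionError) and
-- indices beyond 900*len(L) in absolute value: around |index| ≳ 1000*len(L) A's recursion depth
-- exceeds CPython's recursion limit and A raises RecursionError, and the exact cutoff is an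
-- interpreter setting, not a property of the function, so a safe closed-form bound is used
-- (it also excludes some returning inputs such as ([1,2,3], 2800), where A and B both return 2).
def Pre_wrap_index (L : List Int) (index : Int) : Prop :=
  L ≠ [] ∧ -900 * (L.length : Int) ≤ index ∧ index ≤ 900 * (L.length : Int)
instance (L : List Int) (index : Int) : Decidable (Pre_wrap_index L index) := by
  unfold Pre_wrap_index; infer_instance

def pvWitness_wrap_index : List Int × Int := ([10, 20, 30], -7)

def Spec_wrap_index (L : List Int) (index : Int) (out : Int) : Prop := out = wrap_index_alt L index
instance (L : List Int) (index : Int) (out : Int) : Decidable (Spec_wrap_index L index out) := by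
  unfold Spec_wrap_index; infer_instance

-- ===== CLAIM (what is proved, stated in full; the proofs are below) =====
def Claim_equal_wrap_index : Prop := ∀ (L : List Int) (index : Int), Dom_wrap_index L index → Pre_wrap_index L index → Spec_wrap_index L index (wrap_index L index)

-- ===== LEMMAS AND PROOFS =====

lemma mod_shift_sub (a b : Int) (hb : 0 ≤ b) :
    PySem.Int.mod (a - b) b = PySem.Int.mod a b := by
  rcases lt_or_eq_of_le hb with h | h
  · rw [PySem.Int.mod_eq_emod_of_pos h, PySem.Int.mod_eq_emod_of_pos h, Int.sub_emod_right]
  · simp [← h]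

lemma mod_shift_add (a b : Int) (hb : 0 ≤ b) :
    PySem.Int.mod (a + b) b = PySem.Int.mod a b := by
  rcases lt_or_eq_of_le hb with h | h
  · rw [PySem.Int.mod_eq_emod_of_pos h, PySem.Int.mod_eq_emod_of_pos h, Int.add_emod_right]
  · simp [← h]

lemma alt_shift_sub (L : List Int) (index : Int) :
    wrap_index_alt L (index - (L.length : Int)) = wrap_index_alt L index := by
  unfold wrap_index_alt
  rw [mod_shift_sub _ _ (by positivity)]

lemma alt_shift_add (L : List Int) (index : Int) :
    wrap_index_alt L (index + (L.length : Int)) = wrap_index_alt L index := by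
  unfold wrap_index_alt
  rw [mod_shift_add _ _ (by positivity)]

lemma alt_of_inrange (L : List Int) (index : Int)
    (h0 : -(L.length : Int) ≤ index) (h1 : index < (L.length : Int)) :
    wrap_index_alt L index = (PySem.List.pyGet? L index).getD 0 := by
  have hn : (0 : Int) < L.length := by omega
  unfold wrap_index_alt
  rcases lt_or_ge index 0 with hneg | hpos
  · have hm : PySem.Int.mod index (L.length : Int) = index + L.length := by
      rw [PySem.Int.mod_eq_emod_of_pos hn, ← Int.add_emod_right]
      rw [Int.emod_eq_of_lt (by omega) (by omega)]
    rw [hm]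
    simp only [PySem.List.pyGet?, PySem.List.pyIdx?]
    have h2 : (0 : Int) ≤ index + L.length := by omega
    have h3 : index + (L.length : Int) < L.length := by omega
    rw [if_pos h2, if_pos h3, if_neg (by omega), if_pos h0]
    have : L.length - (-index).toNat = (index + (L.length : Int)).toNat := by omega
    rw [this]
  · have hm : PySem.Int.mod index (L.length : Int) = index := by
      rw [PySem.Int.mod_eq_emod_of_pos hn, Int.emod_eq_of_lt hpos h1]
    rw [hm]

lemma core_eq (L : List Int) (hL : L ≠ []) :
    ∀ (fuel : Nat) (index : Int), index.natAbs < fuel →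
      wrapACore fuel L index = wrap_index_alt L index := by
  intro fuel
  induction fuel with
  | zero => intro index h; omega
  | succ fuel ih =>
    intro index h
    have hn : 0 < L.length := List.length_pos_iff.mpr hL
    unfold wrapACore
    cases hget : PySem.List.pyGet? L index with
    | some v =>
      have hin : PySem.Raise.InRange L.length index := by
        by_contra hc
        rw [← PySem.List.pyGet?_eq_none_iff] at hc
        rw [hget] at hc; simp at hc
      obtain ⟨hlo, hhi⟩ := hin
      rw [alt_of_inrange L index hlo hhi, hget]
      rfl
    | none =>
      rw [PySem.List.pyGet?_eq_none_iff] at hget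
      unfold PySem.Raise.InRange at hget
      push Not at hget
      split_ifs with hpos
      · have hge : (L.length : Int) ≤ index := by
          by_contra hc; push Not at hc
          exact absurd (hget (by omega)) (by omega)
        rw [ih (index - (L.length : Int)) (by omega)]
        exact alt_shift_sub L index
      · have hlt : index < -(L.length : Int) := by
          by_contra hc; push Not at hc
          exact absurd (hget hc) (by omega)
        rw [ih (index + (L.length : Int)) (by omega)]
        exact alt_shift_add L index

-- ===== VERDICT (by name: the statement is the Claim_ definition above) =====
theorem wrap_index_spec : Claim_equal_wrap_index := by
  intro L index _ hpre
  unfold Spec_wrap_index wrap_index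
  exact core_eq L hpre.1 _ index (Nat.lt_succ_self _)
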